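-- pv_equiv track=rewrite | github.com/mattv8/ragtime | ragtime/userspace/sqlite_import.py | _decode_pg_copy_text_value
-- ===== SOURCE A (Python) =====
-- def _decode_pg_copy_text_value(value: str) -> str | None:
--     if value == r"\N":
--         return None
--
--     escapes = {
--         "b": "\b",
--         "f": "\f",
--         "n": "\n",
--         "r": "\r",
--         "t": "\t",
--         "v": "\v",
--         "\\": "\\",
--     }
--     result: list[str] = []
--     index = 0
--     while index < len(value):
--         char = value[index]
--         if char != "\\" or index + 1 >= len(value):
--             result.append(char)
--             index += 1
--             continue
--
--         next_char = value[index + 1]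
--         if next_char in escapes:
--             result.append(escapes[next_char])
--             index += 2
--             continue
--         if next_char in "01234567":
--             end = index + 1
--             while end < len(value) and end < index + 4 and value[end] in "01234567":
--                 end += 1
--             result.append(chr(int(value[index + 1 : end], 8)))
--             index = end
--             continue
--         if next_char == "x":
--             end = index + 2
--             while (
--                 end < len(value)
--                 and end < index + 4
--                 and value[end] in "0123456789abcdefABCDEF"
--             ):
--                 end += 1
--             if end > index + 2:
--                 result.append(chr(int(value[index + 2 : end], 16)))
--                 index = end
--                 continue
--
--         result.append(next_char)
--         index += 2
--
--     return "".join(result)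
-- ===== SOURCE B (Python) =====
-- import re
--
-- _ESCAPES = {
--     "b": "\b",
--     "f": "\f",
--     "n": "\n",
--     "r": "\r",
--     "t": "\t",
--     "v": "\v",
--     "\\": "\\",
-- }
--
-- _PATTERN = re.compile(r"\\(x[0-9a-fA-F]{1,2}|[0-7]{1,3}|.)", re.DOTALL)
--
--
-- def _repl(m: "re.Match[str]") -> str:
--     s = m.group(1)
--     if s in _ESCAPES:
--         return _ESCAPES[s]
--     if s[0] in "01234567":
--         return chr(int(s, 8))
--     if s[0] == "x" and len(s) > 1:
--         return chr(int(s[1:], 16))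
--     return s
--
--
-- def _decode_pg_copy_text_value(value: str) -> str | None:
--     if value == r"\N":
--         return None
--     return _PATTERN.sub(_repl, value)
-- ===== Notes on version B (the rewrite author's own statement) =====
-- stated objective: idiomatic
-- what changed: Replaced the manual index-arithmetic while-loop with a single compiled regex re.sub whose pattern captures each escape (hex, octal or single char) and a small dispatch callback decodes it.
import Mathlib
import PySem

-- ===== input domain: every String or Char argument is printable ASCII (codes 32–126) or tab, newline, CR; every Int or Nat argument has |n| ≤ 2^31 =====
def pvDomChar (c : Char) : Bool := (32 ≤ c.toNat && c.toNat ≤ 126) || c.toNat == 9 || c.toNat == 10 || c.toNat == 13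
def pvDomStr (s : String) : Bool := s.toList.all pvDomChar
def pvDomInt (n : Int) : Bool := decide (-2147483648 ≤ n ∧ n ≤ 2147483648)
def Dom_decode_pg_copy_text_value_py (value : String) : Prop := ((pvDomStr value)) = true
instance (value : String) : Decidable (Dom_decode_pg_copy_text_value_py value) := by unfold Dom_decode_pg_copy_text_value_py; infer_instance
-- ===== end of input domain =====

-- B replaces A's manual index-arithmetic while-loop with a regex-style substitution:
-- a fixed-pattern matcher plus a small decode callback (objective: idiomatic; same O(n) cost).

-- shared character-class helpers (both Pythons contain the same literal digit strings)
def pvIsOct (c : Char) : Bool := "01234567".toList.contains c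
def pvIsHex (c : Char) : Bool := "0123456789abcdefABCDEF".toList.contains c
-- digit value of an octal/hex digit; pvFoldBase b ds = int(ds, b) for a nonempty list of
-- digits of base b ≤ 16 (exact there: no sign/whitespace/underscore ever reaches it)
def pvDigVal (c : Char) : Nat :=
  if 97 ≤ c.toNat then c.toNat - 87 else if 65 ≤ c.toNat then c.toNat - 55 else c.toNat - 48
def pvFoldBase (b : Nat) (ds : List Char) : Nat := ds.foldl (fun a c => a * b + pvDigVal c) 0
-- take at most n leading chars satisfying p (A's bounded inner while; B's {1,3}/{1,2} greedy quantifier)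
def pvTakeUpTo (p : Char → Bool) : Nat → List Char → List Char
  | 0, _ => []
  | _ + 1, [] => []
  | n + 1, c :: t => if p c then c :: pvTakeUpTo p n t else []

-- ===== PORT A =====
-- the escapes dict, keyed by the looked-up character next_char
def pvEscapesA : PySem.Dict Char String :=
  PySem.Dict.mk [('b', "\x08"), ('f', "\x0c"), ('n', "\n"), ('r', "\x0d"), ('t', "\t"),
                 ('v', "\x0b"), ('\\', "\\")]

-- the while loop over index, as recursion on the not-yet-consumed suffix value[index:]
def pvDecodeA : List Char → List Char
  | [] => []
  | [c] => [c]                      -- index + 1 >= len(value): append char, then loop exit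
  | c :: d :: rest' =>
      if c ≠ '\\' then c :: pvDecodeA (d :: rest')
      else
        match PySem.Dict.get? pvEscapesA d with
        | some e => e.toList ++ pvDecodeA rest'
        | none =>
          if pvIsOct d then
            let ds := pvTakeUpTo pvIsOct 2 rest'         -- while end < index+4 …
            Char.ofNat (pvFoldBase 8 (d :: ds)) :: pvDecodeA (rest'.drop ds.length)
          else if d = 'x' then
            let hs := pvTakeUpTo pvIsHex 2 rest'         -- while end < index+4 …
            if hs.isEmpty then d :: pvDecodeA rest'      -- end = index+2: fall through
            else Char.ofNat (pvFoldBase 16 hs) :: pvDecodeA (rest'.drop hs.length)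
          else d :: pvDecodeA rest'
  termination_by l => l.length
  decreasing_by all_goals (simp only [List.length_drop, List.length_cons]; omega)

def decode_pg_copy_text_value_py (value : String) : Option String :=
  if value = "\\N" then none else some (String.ofList (pvDecodeA value.toList))

-- ===== PORT B =====
def pvEscapesB : PySem.Dict String String :=
  PySem.Dict.mk [("b", "\x08"), ("f", "\x0c"), ("n", "\n"), ("r", "\x0d"), ("t", "\t"),
                 ("v", "\x0b"), ("\\", "\\")]

-- hand port of the fixed regex \\(x[0-9a-fA-F]{1,2}|[0-7]{1,3}|.) with re.DOTALL:
-- pvGroupB rest = the capture group when the pattern matches at a '\' followed by rest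
-- (none = no match, i.e. nothing follows the backslash); alternatives tried in order,
-- quantifiers greedy — exact for this pattern.
def pvGroupB (rest : List Char) : Option (List Char) :=
  match rest with
  | [] => none
  | c :: t =>
    if c = 'x' then
      match pvTakeUpTo pvIsHex 2 t with
      | [] => some [c]                 -- x-alternative needs ≥1 hex digit; '.' matches 'x'
      | hs => some (c :: hs)
    else if pvIsOct c then some (c :: pvTakeUpTo pvIsOct 2 t)
    else some [c]                      -- '.' (with DOTALL also matches a newline)

-- the _repl callback on the group s (always nonempty, so s[0] is its head)
def pvReplB (g : List Char) : List Char :=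
  match PySem.Dict.get? pvEscapesB (String.ofList g) with
  | some e => e.toList
  | none =>
    match g with
    | [] => []                          -- unreachable: the group is never empty
    | c :: t =>
      if pvIsOct c then [Char.ofNat (pvFoldBase 8 (c :: t))]
      else if c = 'x' ∧ t ≠ [] then [Char.ofNat (pvFoldBase 16 t)]
      else c :: t

-- re.sub: scan left to right, replace each match (matches start only at '\'), copy the rest
def pvSubB : List Char → List Char
  | [] => []
  | c :: rest =>
    if c = '\\' then
      match pvGroupB rest with
      | some g => pvReplB g ++ pvSubB (rest.drop g.length)
      | none => c :: pvSubB rest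
    else c :: pvSubB rest
  termination_by l => l.length
  decreasing_by all_goals (simp only [List.length_drop, List.length_cons]; omega)

def decode_pg_copy_text_value_py_alt (value : String) : Option String :=
  if value = "\\N" then none else some (String.ofList (pvSubB value.toList))

-- ===== PRECONDITION & SPEC =====
def Spec_decode_pg_copy_text_value_py (value : String) (out : Option String) : Prop := out = decode_pg_copy_text_value_py_alt value
instance (value : String) (out : Option String) : Decidable (Spec_decode_pg_copy_text_value_py value out) := by unfold Spec_decode_pg_copy_text_value_py; infer_instance

-- ===== CLAIM (what is proved, stated in full; the proofs are below) =====
def Claim_equal_decode_pg_copy_text_value_py : Prop := ∀ (value : String), Dom_decode_pg_copy_text_value_py value → Spec_decode_pg_copy_text_value_py value (decode_pg_copy_text_value_py value)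

-- ===== LEMMAS AND PROOFS =====
lemma pvOfList_inj {l m : List Char} : (String.ofList l = String.ofList m) ↔ l = m := by
  constructor
  · intro h; have := congrArg String.toList h; simpa using this
  · intro h; rw [h]

lemma pvLitEq (k d : Char) (t : List Char) :
    (String.ofList [k] = String.ofList (d :: t)) ↔ (d = k ∧ t = []) := by
  rw [pvOfList_inj]
  constructor
  · intro h; cases h; exact ⟨rfl, rfl⟩
  · rintro ⟨rfl, rfl⟩; rfl

-- B's escapes dict misses every group that is not a single key character
lemma pvGetB_none (d : Char) (t : List Char)
    (hb : d ≠ 'b') (hf : d ≠ 'f') (hn : d ≠ 'n') (hr : d ≠ 'r') (ht : d ≠ 't')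
    (hv : d ≠ 'v') (hs : d ≠ '\\') :
    PySem.Dict.get? pvEscapesB (String.ofList (d :: t)) = none := by
  simp only [pvEscapesB, PySem.Dict.get?_mk_cons, beq_iff_eq,
    show ("b" : String) = String.ofList ['b'] from rfl,
    show ("f" : String) = String.ofList ['f'] from rfl,
    show ("n" : String) = String.ofList ['n'] from rfl,
    show ("r" : String) = String.ofList ['r'] from rfl,
    show ("t" : String) = String.ofList ['t'] from rfl,
    show ("v" : String) = String.ofList ['v'] from rfl,
    show ("\\" : String) = String.ofList ['\\'] from rfl, pvLitEq]
  simp [PySem.Dict.get?, hb, hf, hn, hr, ht, hv, hs]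

-- one escape-dict hit, d a key character
lemma pvEscCase (d : Char) (rest' : List Char) (e : String)
    (hx : d ≠ 'x') (ho : pvIsOct d = false)
    (hA : PySem.Dict.get? pvEscapesA d = some e)
    (hB : PySem.Dict.get? pvEscapesB (String.ofList [d]) = some e)
    (ih : pvDecodeA rest' = pvSubB rest') :
    pvDecodeA ('\\' :: d :: rest') = pvSubB ('\\' :: d :: rest') := by
  simp [pvDecodeA, pvSubB, pvGroupB, pvReplB, hx, ho, hA, hB, ih]

lemma pvTakeUpTo_len (p : Char → Bool) : ∀ (n : ℕ) (l : List Char),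
    (pvTakeUpTo p n l).length ≤ l.length := by
  intro n
  induction n with
  | zero => intro l; simp [pvTakeUpTo]
  | succ n ih =>
    intro l
    cases l with
    | nil => simp [pvTakeUpTo]
    | cons c t =>
      simp only [pvTakeUpTo]
      split
      · simpa using ih t
      · simp

lemma pvMain : ∀ (l : List Char), pvDecodeA l = pvSubB l := by
  have key : ∀ (n : ℕ) (l : List Char), l.length ≤ n → pvDecodeA l = pvSubB l := by
    intro n
    induction n with
    | zero =>
      intro l h
      have : l = [] := by cases l <;> simp_all
      subst this; simp [pvDecodeA, pvSubB]
    | succ n ih =>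
      intro l h
      match l with
      | [] => simp [pvDecodeA, pvSubB]
      | [c] =>
        by_cases hc : c = '\\' <;> simp [pvDecodeA, pvSubB, pvGroupB, hc]
      | c :: d :: rest' =>
        have hlen : rest'.length ≤ n := by
          simp only [List.length_cons] at h; omega
        by_cases hc : c = '\\'
        · subst hc
          by_cases hb : d = 'b'
          · subst hb; exact pvEscCase _ _ "\x08" (by decide) (by decide) (by decide) (by decide) (ih rest' hlen)
          by_cases hf : d = 'f'
          · subst hf; exact pvEscCase _ _ "\x0c" (by decide) (by decide) (by decide) (by decide) (ih rest' hlen)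
          by_cases hn : d = 'n'
          · subst hn; exact pvEscCase _ _ "\n" (by decide) (by decide) (by decide) (by decide) (ih rest' hlen)
          by_cases hr : d = 'r'
          · subst hr; exact pvEscCase _ _ "\x0d" (by decide) (by decide) (by decide) (by decide) (ih rest' hlen)
          by_cases ht : d = 't'
          · subst ht; exact pvEscCase _ _ "\t" (by decide) (by decide) (by decide) (by decide) (ih rest' hlen)
          by_cases hv : d = 'v'
          · subst hv; exact pvEscCase _ _ "\x0b" (by decide) (by decide) (by decide) (by decide) (ih rest' hlen)
          by_cases hbs : d = '\\'
          · subst hbs; exact pvEscCase _ _ "\\" (by decide) (by decide) (by decide) (by decide) (ih rest' hlen)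
          have hAesc : PySem.Dict.get? pvEscapesA d = none := by
            simp only [pvEscapesA, PySem.Dict.get?_mk_cons, beq_iff_eq]
            rw [if_neg (Ne.symm hb), if_neg (Ne.symm hf), if_neg (Ne.symm hn),
              if_neg (Ne.symm hr), if_neg (Ne.symm ht), if_neg (Ne.symm hv),
              if_neg (Ne.symm hbs)]
            simp [PySem.Dict.get?]
          by_cases ho : pvIsOct d = true
          · have hx : d ≠ 'x' := by rintro rfl; simp [pvIsOct] at ho
            have hmiss := pvGetB_none d (pvTakeUpTo pvIsOct 2 rest') hb hf hn hr ht hv hbs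
            have hds := pvTakeUpTo_len pvIsOct 2 rest'
            simp [pvDecodeA, pvSubB, pvGroupB, pvReplB, hAesc, ho, hx, hmiss,
              ih (rest'.drop (pvTakeUpTo pvIsOct 2 rest').length)
                (by simp only [List.length_drop]; omega)]
          · by_cases hx : d = 'x'
            · subst hx
              rcases hhs : pvTakeUpTo pvIsHex 2 rest' with _ | ⟨h1, hs'⟩
              · have hmiss := pvGetB_none 'x' [] hb hf hn hr ht hv hbs
                simp [pvDecodeA, pvSubB, pvGroupB, pvReplB, hAesc, hhs, hmiss,
                  pvIsOct, ih rest' hlen]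
              · have hmiss := pvGetB_none 'x' (h1 :: hs') hb hf hn hr ht hv hbs
                have hds : (h1 :: hs').length ≤ rest'.length := by
                  rw [← hhs]; exact pvTakeUpTo_len pvIsHex 2 rest'
                have ihd := ih (rest'.drop (hs'.length + 1))
                  (by simp only [List.length_drop]; omega)
                simp [pvDecodeA, pvSubB, pvGroupB, pvReplB, hAesc, hhs, hmiss,
                  pvIsOct, ihd]
            · have hmiss := pvGetB_none d [] hb hf hn hr ht hv hbs
              simp [pvDecodeA, pvSubB, pvGroupB, pvReplB, hAesc, ho, hx, hmiss,
                ih rest' hlen]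
        · have hlen2 : (d :: rest').length ≤ n := by
            simp only [List.length_cons] at h ⊢; omega
          simp [pvDecodeA, pvSubB, hc, ih (d :: rest') hlen2]
  intro l; exact key l.length l le_rfl

-- ===== VERDICT (by name: the statement is the Claim_ definition above) =====
theorem decode_pg_copy_text_value_py_spec : Claim_equal_decode_pg_copy_text_value_py := by
  intro value _
  unfold Spec_decode_pg_copy_text_value_py decode_pg_copy_text_value_py decode_pg_copy_text_value_py_alt
  rw [pvMain]
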